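-- pv_equiv track=rewrite | github.com/sralus/raspberry-pi-inverter-autosetup | watchpower-like/runtime/wr1_live_mqtt_loop.py | decode_device_status_bits
-- ===== SOURCE A (Python) =====
-- from typing import Any, Dict, Optional
--
-- def decode_device_status_bits(bits: str) -> Dict[str, Any]:
--     bits = bits.strip()
--     out = {"raw": bits}
--
--     if len(bits) >= 8 and all(ch in "01" for ch in bits):
--         padded = bits.ljust(8, "0")
--         out.update({
--             "sbu_priority_version": padded[0] == "1",
--             "config_changed": padded[1] == "1",
--             "scc_firmware_updated": padded[2] == "1",
--             "load_on": padded[3] == "1",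
--             "battery_voltage_to_steady": padded[4] == "1",
--             "charging": padded[5] == "1",
--             "scc_charging": padded[6] == "1",
--             "ac_charging": padded[7] == "1",
--         })
--
--     return out
-- ===== SOURCE B (Python) =====
-- def decode_device_status_bits(bits: str):
--     bits = bits.strip()
--     out = {"raw": bits}
--
--     if len(bits) >= 8 and all(ch in "01" for ch in bits):
--         value = int(bits[:8], 2)
--         names = [
--             "sbu_priority_version",
--             "config_changed",
--             "scc_firmware_updated",
--             "load_on",
--             "battery_voltage_to_steady",
--             "charging",
--             "scc_charging",
--             "ac_charging",
--         ]
--         for i, name in enumerate(names):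
--             out[name] = bool(value & (1 << (7 - i)))
--
--     return out
-- ===== Notes on version B (the rewrite author's own statement) =====
-- stated objective: idiomatic
-- what changed: B parses the first 8 bits once with int(bits[:8], 2) and derives each flag by a bitmask test on that integer, instead of A's per-flag character comparisons on a zero-padded copy of the string.
import Mathlib
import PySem

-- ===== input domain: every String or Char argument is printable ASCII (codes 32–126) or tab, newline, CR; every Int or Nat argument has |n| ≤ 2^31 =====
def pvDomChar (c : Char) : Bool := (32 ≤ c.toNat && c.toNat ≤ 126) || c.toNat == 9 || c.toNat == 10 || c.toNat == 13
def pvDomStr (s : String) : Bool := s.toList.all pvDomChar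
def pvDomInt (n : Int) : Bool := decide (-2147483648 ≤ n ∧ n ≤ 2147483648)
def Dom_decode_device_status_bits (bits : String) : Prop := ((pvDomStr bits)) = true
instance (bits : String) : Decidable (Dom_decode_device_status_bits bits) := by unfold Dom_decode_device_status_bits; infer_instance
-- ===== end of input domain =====

-- B decodes the 8 status bits with one int(bits[:8], 2) conversion and bitmask tests instead of
-- eight positional character comparisons on a padded copy (objective: idiomatic; same cost).

-- ===== PORT A =====
-- str(bool) rendering of a dict value: Python's True/False become "True"/"False" strings.
def pvBitA (padded : List Char) (i : Int) : String :=
  if PySem.List.pyGet? padded i = some '1' then "True" else "False"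

def decode_device_status_bits (bits : String) : List (String × String) :=
  let s := PySem.Str.strip bits
  let l := s.toList
  -- 'ch in "01"' on a single character is exactly ch = '0' ∨ ch = '1'
  if 8 ≤ PySem.Str.len s ∧ (l.all fun ch => ch == '0' || ch == '1') = true then
    -- bits.ljust(8, "0"), hand-ported (exact: right-pad with '0' up to width 8)
    let padded := l ++ List.replicate (8 - l.length) '0'
    [("raw", s),
     ("sbu_priority_version", pvBitA padded 0),
     ("config_changed", pvBitA padded 1),
     ("scc_firmware_updated", pvBitA padded 2),
     ("load_on", pvBitA padded 3),
     ("battery_voltage_to_steady", pvBitA padded 4),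
     ("charging", pvBitA padded 5),
     ("scc_charging", pvBitA padded 6),
     ("ac_charging", pvBitA padded 7)]
  else [("raw", s)]

-- ===== PORT B =====
-- str(bool(value & mask)): "True" iff the masked bit is set.
def pvFlag (v : Int) (m : Int) : String :=
  if PySem.Int.band v m ≠ 0 then "True" else "False"

def decode_device_status_bits_alt (bits : String) : List (String × String) :=
  let s := PySem.Str.strip bits
  let l := s.toList
  if 8 ≤ PySem.Str.len s ∧ (l.all fun ch => ch == '0' || ch == '1') = true then
    -- int(bits[:8], 2): cannot fail here (all chars are 0/1 and len ≥ 8), so getD 0 only totalises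
    let v := (PySem.Int.ofCharsBase? (l.take 8) 2).getD 0
    [("raw", s),
     ("sbu_priority_version", pvFlag v 128),
     ("config_changed", pvFlag v 64),
     ("scc_firmware_updated", pvFlag v 32),
     ("load_on", pvFlag v 16),
     ("battery_voltage_to_steady", pvFlag v 8),
     ("charging", pvFlag v 4),
     ("scc_charging", pvFlag v 2),
     ("ac_charging", pvFlag v 1)]
  else [("raw", s)]

-- ===== PRECONDITION & SPEC =====
def Spec_decode_device_status_bits (bits : String) (out : List (String × String)) : Prop := out = decode_device_status_bits_alt bits
instance (bits : String) (out : List (String × String)) : Decidable (Spec_decode_device_status_bits bits out) := by unfold Spec_decode_device_status_bits; infer_instance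

-- ===== CLAIM (what is proved, stated in full; the proofs are below) =====
def Claim_equal_decode_device_status_bits : Prop := ∀ (bits : String), Dom_decode_device_status_bits bits → Spec_decode_device_status_bits bits (decode_device_status_bits bits)

-- ===== LEMMAS AND PROOFS =====

-- ===== VERDICT (by name: the statement is the Claim_ definition above) =====
theorem decode_device_status_bits_spec : Claim_equal_decode_device_status_bits := by
  intro bits _
  unfold Spec_decode_device_status_bits
  simp only [decode_device_status_bits, decode_device_status_bits_alt]
  split_ifs with h
  · obtain ⟨hlen, hall⟩ := h
    rw [PySem.Str.len_eq] at hlen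
    generalize hG : (PySem.Str.strip bits).toList = L at *
    rcases L with _ | ⟨c0, L⟩; · simp at hlen
    rcases L with _ | ⟨c1, L⟩; · simp at hlen
    rcases L with _ | ⟨c2, L⟩; · simp at hlen
    rcases L with _ | ⟨c3, L⟩; · simp at hlen
    rcases L with _ | ⟨c4, L⟩; · simp at hlen
    rcases L with _ | ⟨c5, L⟩; · simp at hlen
    rcases L with _ | ⟨c6, L⟩; · simp at hlen
    rcases L with _ | ⟨c7, L⟩; · simp at hlen
    have hrep : 8 - (c0::c1::c2::c3::c4::c5::c6::c7::L).length = 0 := by simp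
    rw [hrep, List.replicate_zero, List.append_nil]
    simp only [List.all_cons, Bool.and_eq_true, beq_iff_eq, Bool.or_eq_true] at hall
    obtain ⟨h0, h1, h2, h3, h4, h5, h6, h7, -⟩ := hall
    simp only [pvBitA, pvFlag, List.take_succ_cons, List.take_zero]
    simp only [pysem]
    rcases h0 with rfl | rfl <;> rcases h1 with rfl | rfl <;> rcases h2 with rfl | rfl <;>
      rcases h3 with rfl | rfl <;> rcases h4 with rfl | rfl <;> rcases h5 with rfl | rfl <;>
      rcases h6 with rfl | rfl <;> rcases h7 with rfl | rfl <;> rfl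
  · rfl
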